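-- pv_equiv track=rewrite | github.com/AmyDylen/Logic2 | 2.logic2-multi-fewshot.py | detect_protocol
-- ===== SOURCE A (Python) =====
-- def detect_protocol(filename):
--     """检测文件名对应的协议类型"""
--     tls_patterns = ['_tls1.0.csv', '_tls1.1.csv', '_tls1.2.csv', '_tls1.3.csv', '_ssl3.0.csv']
--     for pattern in tls_patterns:
--         if filename.endswith(pattern):
--             return 'TLS'
--
--     if filename.endswith('_http.csv'):
--         return 'HTTP'
--
--     if filename.endswith('_tcp.csv'):
--         return 'TCP'
--
--     return 'Unknown'
-- ===== SOURCE B (Python) =====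
-- _PROTO = {
--     'tls1.0.csv': 'TLS',
--     'tls1.1.csv': 'TLS',
--     'tls1.2.csv': 'TLS',
--     'tls1.3.csv': 'TLS',
--     'ssl3.0.csv': 'TLS',
--     'http.csv': 'HTTP',
--     'tcp.csv': 'TCP',
-- }
--
-- def detect_protocol(filename):
--     head, sep, token = filename.rpartition('_')
--     if not sep:
--         return 'Unknown'
--     return _PROTO.get(token, 'Unknown')
-- ===== Notes on version B (the rewrite author's own statement) =====
-- stated objective: idiomatic
-- what changed: Replaces A's chain of seven endswith suffix scans with one rpartition('_') extracting the token after the last underscore followed by a single dict lookup.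
import Mathlib
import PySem

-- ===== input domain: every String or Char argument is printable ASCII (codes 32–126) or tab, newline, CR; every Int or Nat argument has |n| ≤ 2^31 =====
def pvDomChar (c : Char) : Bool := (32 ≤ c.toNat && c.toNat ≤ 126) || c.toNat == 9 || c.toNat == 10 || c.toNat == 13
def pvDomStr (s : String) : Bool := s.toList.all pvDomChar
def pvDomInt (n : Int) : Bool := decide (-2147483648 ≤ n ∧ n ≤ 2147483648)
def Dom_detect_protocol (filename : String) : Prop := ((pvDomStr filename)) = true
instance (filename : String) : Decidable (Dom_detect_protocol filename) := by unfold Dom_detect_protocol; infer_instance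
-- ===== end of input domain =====

-- B replaces A's chain of endswith scans by one rpartition extracting the token
-- after the last underscore and a single dict lookup (idiomatic; same cost).

-- ===== PORT A =====
def detect_protocol (filename : String) : String :=
  let tls_patterns := ["_tls1.0.csv", "_tls1.1.csv", "_tls1.2.csv", "_tls1.3.csv", "_ssl3.0.csv"]
  match tls_patterns.find? (fun pattern => PySem.Str.endswith filename pattern) with
  | some _ => "TLS"
  | none =>
    if PySem.Str.endswith filename "_http.csv" then "HTTP"
    else if PySem.Str.endswith filename "_tcp.csv" then "TCP"
    else "Unknown"

-- ===== PORT B =====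
-- hand port of filename.rpartition('_'): returns the characters after the LAST
-- underscore (none when there is no underscore, i.e. sep == ''); exact for a
-- single-character separator.
def pvRpartTok (l : List Char) : Option (List Char) :=
  match l with
  | [] => none
  | c :: rest =>
    match pvRpartTok rest with
    | some t => some t
    | none => if c = '_' then some rest else none

def pvProto : PySem.Dict String String :=
  PySem.Dict.mk [("tls1.0.csv", "TLS"), ("tls1.1.csv", "TLS"), ("tls1.2.csv", "TLS"),
                 ("tls1.3.csv", "TLS"), ("ssl3.0.csv", "TLS"),
                 ("http.csv", "HTTP"), ("tcp.csv", "TCP")]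

def detect_protocol_alt (filename : String) : String :=
  match pvRpartTok filename.toList with
  | none => "Unknown"
  | some t => PySem.Dict.getD pvProto (String.ofList t) "Unknown"

-- ===== PRECONDITION & SPEC =====
def Spec_detect_protocol (filename : String) (out : String) : Prop := out = detect_protocol_alt filename
instance (filename : String) (out : String) : Decidable (Spec_detect_protocol filename out) := by unfold Spec_detect_protocol; infer_instance

-- ===== CLAIM (what is proved, stated in full; the proofs are below) =====
def Claim_equal_detect_protocol : Prop := ∀ (filename : String), Dom_detect_protocol filename → Spec_detect_protocol filename (detect_protocol filename)

-- ===== LEMMAS AND PROOFS =====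

theorem pvRpartTok_eq_none {l : List Char} (h : '_' ∉ l) : pvRpartTok l = none := by
  induction l with
  | nil => rfl
  | cons c rest ih =>
    simp only [List.mem_cons, not_or] at h
    have hc : ¬ c = '_' := fun e => h.1 e.symm
    simp [pvRpartTok, ih h.2, hc]

theorem not_mem_of_pvRpartTok_none {l : List Char} (h : pvRpartTok l = none) : '_' ∉ l := by
  induction l with
  | nil => simp
  | cons c rest ih =>
    simp only [pvRpartTok] at h
    cases hr : pvRpartTok rest with
    | some t' => simp [hr] at h
    | none =>
      rw [hr] at h
      by_cases hc : c = '_'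
      · simp [hc] at h
      · simp only [List.mem_cons, not_or]
        exact ⟨fun e => hc e.symm, ih hr⟩

-- soundness: some t means l ends with '_' :: t and t has no underscore
theorem pvRpartTok_sound {l t : List Char} (h : pvRpartTok l = some t) :
    ('_' :: t) <:+ l ∧ '_' ∉ t := by
  induction l generalizing t with
  | nil => simp [pvRpartTok] at h
  | cons c rest ih =>
    simp only [pvRpartTok] at h
    cases hr : pvRpartTok rest with
    | some t' =>
      rw [hr] at h
      obtain rfl : t' = t := by simpa using h
      obtain ⟨h1, h2⟩ := ih hr
      exact ⟨h1.trans (List.suffix_cons c rest), h2⟩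
    | none =>
      rw [hr] at h
      by_cases hc : c = '_'
      · subst hc
        obtain rfl : rest = t := by simpa using h
        exact ⟨List.suffix_refl _, not_mem_of_pvRpartTok_none hr⟩
      · simp [hc] at h

-- completeness: if l ends with '_' :: p and p has no underscore then some p
theorem pvRpartTok_complete {l p : List Char} (hs : ('_' :: p) <:+ l) (hp : '_' ∉ p) :
    pvRpartTok l = some p := by
  obtain ⟨pre, rfl⟩ := hs
  induction pre with
  | nil => simp [pvRpartTok, pvRpartTok_eq_none hp]
  | cons c pre ih =>
    simp only [List.cons_append, pvRpartTok, ih]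

theorem pv_eq_ofList (s : String) (q : List Char) : (s = String.ofList q) ↔ q = s.toList := by
  constructor
  · intro h; rw [h]; simp
  · intro h; rw [h, String.ofList_toList]

theorem detect_protocol_spec : Claim_equal_detect_protocol := by
  intro filename _
  unfold Spec_detect_protocol detect_protocol detect_protocol_alt
  cases h : pvRpartTok filename.toList with
  | none =>
    have hno : '_' ∉ filename.toList := not_mem_of_pvRpartTok_none h
    have key : ∀ (q : List Char), '_' ∈ q → PySem.Chars.endswith filename.toList q = false := by
      intro q hq
      cases hb : PySem.Chars.endswith filename.toList q with
      | false => rfl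
      | true => exact absurd (((PySem.Chars.endswith_iff _ _).mp hb).subset hq) hno
    simp [List.find?, key]
  | some t =>
    obtain ⟨hsuf, hnot⟩ := pvRpartTok_sound h
    have hpos : ∀ (q : List Char), '_' ∉ q →
        PySem.Chars.endswith filename.toList ('_' :: q) = decide (t = q) := by
      intro q hq
      by_cases he : t = q
      · subst he
        simp [(PySem.Chars.endswith_iff _ _).mpr hsuf]
      · cases hb : PySem.Chars.endswith filename.toList ('_' :: q) with
        | false => simp [he]
        | true =>
          have hc := pvRpartTok_complete ((PySem.Chars.endswith_iff _ _).mp hb) hq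
          rw [h] at hc
          exact absurd (by simpa using hc) he
    simp [List.find?, hpos, pvProto, PySem.Dict.getD, PySem.Dict.get?_mk_cons, pv_eq_ofList]
    by_cases h0 : t = ['t', 'l', 's', '1', '.', '0', '.', 'c', 's', 'v']
    · subst h0; decide
    by_cases h1 : t = ['t', 'l', 's', '1', '.', '1', '.', 'c', 's', 'v']
    · subst h1; decide
    by_cases h2 : t = ['t', 'l', 's', '1', '.', '2', '.', 'c', 's', 'v']
    · subst h2; decide
    by_cases h3 : t = ['t', 'l', 's', '1', '.', '3', '.', 'c', 's', 'v']
    · subst h3; decide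
    by_cases h4 : t = ['s', 's', 'l', '3', '.', '0', '.', 'c', 's', 'v']
    · subst h4; decide
    by_cases h5 : t = ['h', 't', 't', 'p', '.', 'c', 's', 'v']
    · subst h5; decide
    by_cases h6 : t = ['t', 'c', 'p', '.', 'c', 's', 'v']
    · subst h6; decide
    · simp [h0, h1, h2, h3, h4, h5, h6, PySem.Dict.get?]
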